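-- pv_equiv track=rewrite | github.com/kingsley-ijomah/python-basics | book-store/book_store.py | total
-- ===== SOURCE A (Python) =====
-- from collections import Counter
--
-- group_cost = [800, 1520, 2160, 2560, 3000]
--
-- def total(basket):
--     books = Counter(basket)
--     groups = []
--     price = 0
--
--     while different_count := len(books):
--         price += group_cost[different_count - 1]
--         groups.append(different_count)
--         for book in books:
--             books[book] -= 1
--         books = +books
--
--     # 2 * 4 books are cheaper than 5 + 3 books (5120 = 5160 - 40)
--     while 3 in groups and 5 in groups:
--         price -= 40
--         groups.remove(3)
--         groups.remove(5)
--
--     return price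
-- ===== SOURCE B (Python) =====
-- from collections import Counter
--
-- group_cost = [800, 1520, 2160, 2560, 3000]
--
-- def total(basket):
--     counts = sorted(Counter(basket).values(), reverse=True)
--     counts += [0] * (6 - len(counts))
--     n = [counts[k] - counts[k + 1] for k in range(5)]
--     price = sum(group_cost[k] * n[k] for k in range(5))
--     return price - 40 * min(n[2], n[4])
-- ===== Notes on version B (the rewrite author's own statement) =====
-- stated objective: faster
-- what changed: Replaces A's iterative peeling loop over a Counter (one pass per copy of the most frequent book, each decrementing every count) and its pair-removal discount loop by a closed form: sort the counts descending, pad with zeros, take consecutive differences to get the number of groups of each size, sum the group costs, and subtract 40*min(#3-groups, #5-groups).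
import Mathlib
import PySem

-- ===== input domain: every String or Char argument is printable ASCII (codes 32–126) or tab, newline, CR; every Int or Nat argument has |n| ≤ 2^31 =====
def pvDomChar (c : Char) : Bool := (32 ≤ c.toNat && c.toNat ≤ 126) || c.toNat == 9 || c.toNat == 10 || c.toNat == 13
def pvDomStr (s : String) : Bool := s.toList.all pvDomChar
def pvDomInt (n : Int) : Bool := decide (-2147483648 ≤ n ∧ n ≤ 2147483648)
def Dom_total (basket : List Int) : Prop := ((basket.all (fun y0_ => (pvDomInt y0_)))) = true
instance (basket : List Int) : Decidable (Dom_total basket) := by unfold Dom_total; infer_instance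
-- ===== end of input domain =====

-- B replaces A's two peeling/removal loops by a closed-form price from the sorted count differences (alternative decomposition; return value only, no mutation observable).

-- ===== PORT A =====
def group_cost : List Int := [800, 1520, 2160, 2560, 3000]

-- `for book in books: books[book] -= 1` followed by `books = +books`:
-- decrement every value, keep only the positive ones (order preserved)
def decStep (books : PySem.Dict Int Int) : PySem.Dict Int Int :=
  PySem.Dict.mk ((books.items.map (fun p => (p.1, p.2 - 1))).filter (fun p => decide (0 < p.2)))

-- the `while different_count := len(books)` loop; fuel ≥ max count suffices (each pass
-- decrements every count by 1).  pyGet? none = IndexError (> 5 distinct books), outside Pre_.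
def loop1 : Nat → PySem.Dict Int Int → List Int → Int → List Int × Int
  | 0, _, groups, price => (groups, price)
  | fuel+1, books, groups, price =>
    if books.size = 0 then (groups, price)
    else
      match PySem.List.pyGet? group_cost ((books.size : Int) - 1) with
      | none => (groups, price)
      | some c => loop1 fuel (decStep books) (groups ++ [(books.size : Int)]) (price + c)

-- the `while 3 in groups and 5 in groups` discount loop
def loop2 : Nat → List Int → Int → Int
  | 0, _, price => price
  | fuel+1, groups, price =>
    if (3 : Int) ∈ groups ∧ (5 : Int) ∈ groups then
      match PySem.List.remove? groups 3 with
      | none => price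
      | some g3 =>
        match PySem.List.remove? g3 5 with
        | none => price
        | some g35 => loop2 fuel g35 (price - 40)
    else price

def total (basket : List Int) : Int :=
  let books := PySem.Dict.counter basket
  let r := loop1 (basket.length + 1) books [] 0
  loop2 (r.1.length + 1) r.1 r.2

-- ===== PORT B =====
def total_alt (basket : List Int) : Int :=
  let counts := PySem.List.sorted (PySem.Dict.counter basket).values (fun x => x) true
  let padded := counts ++ List.replicate (6 - counts.length) 0
  let n := (List.range 5).map (fun k => padded.getD k 0 - padded.getD (k + 1) 0)
  let price := ((List.range 5).map (fun k => group_cost.getD k 0 * n.getD k 0)).sum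
  price - 40 * min (n.getD 2 0) (n.getD 4 0)

-- ===== PRECONDITION & SPEC =====
-- A raises IndexError (group_cost[different_count - 1]) as soon as the basket holds more
-- than 5 distinct books; Pre_ admits exactly the baskets on which A returns.
def Pre_total (basket : List Int) : Prop := (PySem.List.dedup basket).length ≤ 5
instance (basket : List Int) : Decidable (Pre_total basket) := by unfold Pre_total; infer_instance

def pvWitness_total : List Int := [1, 1, 2, 3, 3, 3]

def Spec_total (basket : List Int) (out : Int) : Prop := out = total_alt basket
instance (basket : List Int) (out : Int) : Decidable (Spec_total basket out) := by unfold Spec_total; infer_instance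

-- ===== CLAIM (what is proved, stated in full; the proofs are below) =====
def Claim_equal_total : Prop := ∀ (basket : List Int), Dom_total basket → Pre_total basket → Spec_total basket (total basket)

-- ===== LEMMAS AND PROOFS =====

-- entry k of a count list (0 beyond the end)
def pv (cs : List Int) (k : Nat) : Int := cs.getD k 0

-- one peeling pass on the value multiset: decrement, drop zeros
def stepC (cs : List Int) : List Int := (cs.map (fun c => c - 1)).filter (fun c => decide (0 < c))

-- the sequence of group sizes A's first loop records, and the base price it accumulates
def sizesF : Nat → List Int → List Int
  | 0, _ => []
  | f+1, cs => if cs.length = 0 then [] else (cs.length : Int) :: sizesF f (stepC cs)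

def baseF : Nat → List Int → Int
  | 0, _ => 0
  | f+1, cs => if cs.length = 0 then 0 else group_cost.getD (cs.length - 1) 0 + baseF f (stepC cs)

lemma values_decStep (d : PySem.Dict Int Int) : (decStep d).values = stepC d.values := by
  simp [decStep, stepC, PySem.Dict.values, List.filter_map, List.map_map]
  rfl

lemma sizesF_perm (f : Nat) (cs cs' : List Int) (h : cs.Perm cs') :
    sizesF f cs = sizesF f cs' ∧ baseF f cs = baseF f cs' := by
  induction f generalizing cs cs' with
  | zero => exact ⟨rfl, rfl⟩
  | succ f ih =>
    have hlen := h.length_eq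
    have hstep : (stepC cs).Perm (stepC cs') := (h.map _).filter _
    have := ih _ _ hstep
    simp [sizesF, baseF, hlen, this.1, this.2]

lemma pv_stepC (cs : List Int) (hs : cs.Pairwise (fun a b => b ≤ a)) (h1 : ∀ c ∈ cs, 1 ≤ c)
    (k : Nat) : pv (stepC cs) k = max (pv cs k - 1) 0 := by
  induction cs generalizing k with
  | nil => simp [pv, stepC]
  | cons c t ih =>
    have hc1 : 1 ≤ c := h1 c (by simp)
    have hs' : t.Pairwise (fun a b => b ≤ a) := hs.tail
    have h1' : ∀ x ∈ t, 1 ≤ x := fun x hx => h1 x (by simp [hx])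
    by_cases hc : 1 < c
    · have hst : stepC (c :: t) = (c - 1) :: stepC t := by
        simp [stepC, List.filter_cons]
        omega
      cases k with
      | zero => simp [hst, pv]; omega
      | succ k =>
        rw [hst]
        simpa [pv] using ih hs' h1' k
    · have hx1 : ∀ x ∈ c :: t, x = 1 := by
        intro x hx
        rcases List.mem_cons.mp hx with rfl | hx
        · omega
        · have hxle : x ≤ c := (List.pairwise_cons.mp hs).1 x hx
          have := h1' x hx
          omega
      have hst : stepC (c :: t) = [] := by
        simp only [stepC, List.filter_eq_nil_iff]
        intro a ha
        simp only [List.mem_map] at ha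
        obtain ⟨x, hx, rfl⟩ := ha
        have := hx1 x hx
        simp [this]
      have hub : (c :: t).getD k 0 ≤ 1 ∧ 0 ≤ (c :: t).getD k 0 := by
        rcases Nat.lt_or_ge k (c :: t).length with h | h
        · have hmem : (c :: t).getD k 0 ∈ c :: t := by
            rw [List.getD_eq_getElem _ _ h]; exact List.getElem_mem h
          have := hx1 _ hmem
          omega
        · rw [List.getD_eq_default _ _ h]
          omega
      unfold pv
      rw [hst]
      simp only [List.getD_nil]
      omega

lemma pv_nonneg (cs : List Int) (h1 : ∀ c ∈ cs, 1 ≤ c) (k : Nat) : 0 ≤ pv cs k := by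
  unfold pv
  rcases Nat.lt_or_ge k cs.length with h | h
  · have hmem : cs.getD k 0 ∈ cs := by
      rw [List.getD_eq_getElem _ _ h]; exact List.getElem_mem h
    have := h1 _ hmem; omega
  · rw [List.getD_eq_default _ _ h]

lemma pv_pos_iff (cs : List Int) (h1 : ∀ c ∈ cs, 1 ≤ c) (k : Nat) :
    1 ≤ pv cs k ↔ k < cs.length := by
  unfold pv
  rcases Nat.lt_or_ge k cs.length with h | h
  · have hmem : cs.getD k 0 ∈ cs := by
      rw [List.getD_eq_getElem _ _ h]; exact List.getElem_mem h
    exact iff_of_true (h1 _ hmem) h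
  · rw [List.getD_eq_default _ _ h]
    constructor
    · omega
    · omega

lemma pv_mono (cs : List Int) (hs : cs.Pairwise (fun a b => b ≤ a)) (h1 : ∀ c ∈ cs, 1 ≤ c)
    (k : Nat) : pv cs (k + 1) ≤ pv cs k := by
  rcases Nat.lt_or_ge (k + 1) cs.length with h | h
  · have hk : k < cs.length := by omega
    have := (List.pairwise_iff_getElem.mp hs) k (k + 1) hk h (by omega)
    unfold pv
    rw [List.getD_eq_getElem _ _ h, List.getD_eq_getElem _ _ hk]
    exact this
  · have h0 := pv_nonneg cs h1 k
    unfold pv at *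
    rw [List.getD_eq_default _ _ h]
    exact h0

lemma stepC_sorted (cs : List Int) (hs : cs.Pairwise (fun a b => b ≤ a)) :
    (stepC cs).Pairwise (fun a b => b ≤ a) := by
  exact (hs.map _ (fun a b (h : b ≤ a) => by omega)).filter _

lemma stepC_pos (cs : List Int) : ∀ c ∈ stepC cs, 1 ≤ c := by
  intro c hc
  have := (List.mem_filter.mp hc).2
  simp at this
  omega

lemma stepC_length_le (cs : List Int) : (stepC cs).length ≤ cs.length := by
  calc (stepC cs).length ≤ (cs.map (fun c => c - 1)).length := List.length_filter_le _ _
    _ = cs.length := List.length_map ..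

lemma stepC_bound (cs : List Int) (f : Nat) (hf : ∀ c ∈ cs, c ≤ (f : Int) + 1) :
    ∀ c ∈ stepC cs, c ≤ (f : Int) := by
  intro c hc
  obtain ⟨x, hx, rfl⟩ := List.mem_map.mp (List.mem_filter.mp hc).1
  have := hf x hx
  omega

lemma main_lemma (f : Nat) (cs : List Int) (hs : cs.Pairwise (fun a b => b ≤ a))
    (h1 : ∀ c ∈ cs, 1 ≤ c) (hlen : cs.length ≤ 5) (hf : ∀ c ∈ cs, c ≤ (f : Int)) :
    baseF f cs = 800 * (pv cs 0 - pv cs 1) + 1520 * (pv cs 1 - pv cs 2)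
        + 2160 * (pv cs 2 - pv cs 3) + 2560 * (pv cs 3 - pv cs 4) + 3000 * pv cs 4
      ∧ ((sizesF f cs).count 3 : Int) = pv cs 2 - pv cs 3
      ∧ ((sizesF f cs).count 5 : Int) = pv cs 4 := by
  induction f generalizing cs with
  | zero =>
    have hnil : cs = [] := by
      cases cs with
      | nil => rfl
      | cons c t =>
        have := h1 c (by simp)
        have := hf c (by simp)
        omega
    subst hnil
    simp [sizesF, baseF, pv]
  | succ f ih =>
    by_cases hnil : cs.length = 0
    · rw [List.length_eq_zero_iff] at hnil
      subst hnil
      simp [sizesF, baseF, pv]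
    · have hs' := stepC_sorted cs hs
      have h1' := stepC_pos cs
      have hlen' : (stepC cs).length ≤ 5 := le_trans (stepC_length_le cs) hlen
      have hf' := stepC_bound cs f (fun c hc => by have := hf c hc; push_cast at *; omega)
      obtain ⟨ihb, ih3, ih5⟩ := ih (stepC cs) hs' h1' hlen' hf'
      have e0 := pv_stepC cs hs h1 0
      have e1 := pv_stepC cs hs h1 1
      have e2 := pv_stepC cs hs h1 2
      have e3 := pv_stepC cs hs h1 3
      have e4 := pv_stepC cs hs h1 4
      have p0 := pv_pos_iff cs h1 0
      have p1 := pv_pos_iff cs h1 1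
      have p2 := pv_pos_iff cs h1 2
      have p3 := pv_pos_iff cs h1 3
      have p4 := pv_pos_iff cs h1 4
      have n0 := pv_nonneg cs h1 0
      have n1 := pv_nonneg cs h1 1
      have n2 := pv_nonneg cs h1 2
      have n3 := pv_nonneg cs h1 3
      have n4 := pv_nonneg cs h1 4
      have m0 := pv_mono cs hs h1 0
      have m1 := pv_mono cs hs h1 1
      have m2 := pv_mono cs hs h1 2
      have m3 := pv_mono cs hs h1 3
      simp only [sizesF, baseF, if_neg hnil, List.count_cons, ihb, e0, e1, e2, e3, e4]
      have hL1 : 1 ≤ cs.length := by omega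
      interval_cases hL : cs.length
      all_goals
        push_cast
        rw [e2, e3] at ih3
        rw [e4] at ih5
        norm_num [group_cost]
        omega

lemma loop1_eq (f : Nat) (d : PySem.Dict Int Int) (g : List Int) (p : Int)
    (hlen : d.values.length ≤ 5) :
    loop1 f d g p = (g ++ sizesF f d.values, p + baseF f d.values) := by
  induction f generalizing d g p with
  | zero => simp [loop1, sizesF, baseF]
  | succ f ih =>
    have hsz : d.size = d.values.length := by
      simp [PySem.Dict.size, PySem.Dict.values]
    by_cases h0 : d.size = 0
    · have hl0 : d.values.length = 0 := by omega
      simp [loop1, h0, sizesF, baseF, hl0]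
    · have hget : PySem.List.pyGet? group_cost ((d.size : Int) - 1)
          = some (group_cost.getD (d.size - 1) 0) := by
        have hcast : ((d.size : Int) - 1) = ((d.size - 1 : Nat) : Int) := by omega
        have hlt : d.size - 1 < group_cost.length := by simp [group_cost]; omega
        rw [hcast, PySem.List.pyGet?_natCast group_cost (d.size - 1), List.getElem?_eq_getElem hlt, List.getD_eq_getElem _ _ hlt]
      have hlen' : (decStep d).values.length ≤ 5 := by
        rw [values_decStep]
        exact le_trans (stepC_length_le _) hlen
      simp only [loop1, if_neg h0, hget]
      rw [ih _ _ _ hlen', values_decStep]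
      have hl0 : ¬ d.values.length = 0 := by omega
      simp only [sizesF, baseF, if_neg hl0, hsz]
      rw [Prod.mk.injEq]
      exact ⟨by simp, by ring⟩

lemma loop2_eq (f : Nat) (g : List Int) (p : Int) (hf : g.count 3 ≤ f) :
    loop2 f g p = p - 40 * min ((g.count 3 : Int)) ((g.count 5 : Int)) := by
  induction f generalizing g p with
  | zero =>
    have h3 : g.count 3 = 0 := by omega
    have hmin : min ((0:Nat) : Int) ((g.count 5 : Nat) : Int) = 0 :=
      min_eq_left (Int.natCast_nonneg _)
    simp only [loop2, h3] at hmin ⊢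
    rw [hmin]
    ring
  | succ f ih =>
    by_cases hmem : (3 : Int) ∈ g ∧ (5 : Int) ∈ g
    · obtain ⟨h3, h5⟩ := hmem
      have hr3 : PySem.List.remove? g 3 = some (g.erase 3) :=
        PySem.List.remove?_eq_some_erase g 3 h3
      have h5' : (5 : Int) ∈ g.erase 3 := (List.mem_erase_of_ne (by norm_num)).mpr h5
      have hr5 : PySem.List.remove? (g.erase 3) 5 = some ((g.erase 3).erase 5) :=
        PySem.List.remove?_eq_some_erase (g.erase 3) 5 h5'
      have hc3 : ((g.erase 3).erase 5).count 3 = g.count 3 - 1 := by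
        rw [List.count_erase_of_ne (by norm_num), List.count_erase_self]
      have hc5 : ((g.erase 3).erase 5).count 5 = g.count 5 - 1 := by
        rw [List.count_erase_self, List.count_erase_of_ne (by norm_num)]
      have hp3 : 1 ≤ g.count 3 := List.one_le_count_iff.mpr h3
      have hp5 : 1 ≤ g.count 5 := List.one_le_count_iff.mpr h5
      have hand : (3 : Int) ∈ g ∧ (5 : Int) ∈ g := ⟨h3, h5⟩
      simp only [loop2, if_pos hand, hr3, hr5]
      rw [ih _ _ (by omega)]
      rw [hc3, hc5]
      have e3 : ((g.count 3 - 1 : Nat) : Int) = (g.count 3 : Int) - 1 := by omega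
      have e5 : ((g.count 5 - 1 : Nat) : Int) = (g.count 5 : Int) - 1 := by omega
      rw [e3, e5, min_sub_sub_right]
      ring
    · have : g.count 3 = 0 ∨ g.count 5 = 0 := by
        rcases not_and_or.mp hmem with h | h
        · exact Or.inl (List.count_eq_zero.mpr h)
        · exact Or.inr (List.count_eq_zero.mpr h)
      simp only [loop2, if_neg hmem]
      rcases this with h | h
      · have hmin : min ((g.count 3 : Nat) : Int) ((g.count 5 : Nat) : Int) = 0 := by
          rw [h]; exact min_eq_left (Int.natCast_nonneg _)
        rw [hmin]; ring
      · have hmin : min ((g.count 3 : Nat) : Int) ((g.count 5 : Nat) : Int) = 0 := by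
          rw [h]; exact min_eq_right (Int.natCast_nonneg _)
        rw [hmin]; ring

lemma getD_pad (cs : List Int) (k : Nat) :
    (cs ++ List.replicate (6 - cs.length) 0).getD k 0 = cs.getD k 0 := by
  rcases Nat.lt_or_ge k cs.length with h | h
  · rw [List.getD_eq_getElem _ _ (by simp only [List.length_append, List.length_replicate]; omega), List.getElem_append_left h,
      List.getD_eq_getElem _ _ h]
  · rw [List.getD_eq_default _ _ h]
    rcases Nat.lt_or_ge k (cs ++ List.replicate (6 - cs.length) 0).length with h2 | h2
    · rw [List.getD_eq_getElem _ _ h2, List.getElem_append_right h]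
      simp
    · rw [List.getD_eq_default _ _ h2]

-- ===== VERDICT (by name: the statement is the Claim_ definition above) =====
theorem total_spec : Claim_equal_total := by
  intro basket hdom hpre
  unfold Spec_total total total_alt
  dsimp only
  have hvals : (PySem.Dict.counter basket).values
      = (PySem.List.dedup basket).map (fun k => ((basket.count k : Nat) : Int)) := by
    simp [PySem.Dict.values, PySem.Dict.items_counter, List.map_map, PySem.List.dedup_eq_ofList]
  have hlen : (PySem.Dict.counter basket).values.length ≤ 5 := by
    rw [hvals]
    simpa using hpre
  have h1 : ∀ c ∈ (PySem.Dict.counter basket).values, 1 ≤ c := by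
    rw [hvals]
    intro c hc
    obtain ⟨k, hk, rfl⟩ := List.mem_map.mp hc
    have hkb : k ∈ basket := (PySem.List.mem_dedup basket k).mp hk
    have := List.count_pos_iff.mpr hkb
    omega
  have hbound : ∀ c ∈ (PySem.Dict.counter basket).values,
      c ≤ ((basket.length + 1 : Nat) : Int) := by
    rw [hvals]
    intro c hc
    obtain ⟨k, hk, rfl⟩ := List.mem_map.mp hc
    have := List.count_le_length (l := basket) (a := k)
    omega
  have hperm : (PySem.List.sorted (PySem.Dict.counter basket).values (fun x => x) true).Perm
      (PySem.Dict.counter basket).values := PySem.List.sorted_perm _ _ _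
  set cs := PySem.List.sorted (PySem.Dict.counter basket).values (fun x => x) true with hcs
  have hs : cs.Pairwise (fun a b => b ≤ a) := by
    simpa using PySem.List.sorted_pairwise_rev (PySem.Dict.counter basket).values (fun x => x)
  have h1' : ∀ c ∈ cs, 1 ≤ c := fun c hc => h1 c (hperm.mem_iff.mp hc)
  have hlen' : cs.length ≤ 5 := by rw [hperm.length_eq]; exact hlen
  have hbound' : ∀ c ∈ cs, c ≤ ((basket.length + 1 : Nat) : Int) :=
    fun c hc => hbound c (hperm.mem_iff.mp hc)
  rw [loop1_eq _ _ _ _ hlen]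
  obtain ⟨hseq, hbeq⟩ :=
    sizesF_perm (basket.length + 1) (PySem.Dict.counter basket).values cs hperm.symm
  simp only [List.nil_append, zero_add, hseq, hbeq]
  rw [loop2_eq _ _ _ (le_trans (List.count_le_length) (Nat.le_succ _))]
  obtain ⟨hb, h3c, h5c⟩ := main_lemma (basket.length + 1) cs hs h1' hlen'
    (by intro c hc; have := hbound' c hc; push_cast at *; omega)
  rw [hb, h3c, h5c]
  have g0 := getD_pad cs 0
  have g1 := getD_pad cs 1
  have g2 := getD_pad cs 2
  have g3 := getD_pad cs 3
  have g4 := getD_pad cs 4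
  have g5 := getD_pad cs 5
  have pv5 : cs.getD 5 0 = 0 := List.getD_eq_default _ _ (by omega)
  simp only [List.getD] at g0 g1 g2 g3 g4 g5 pv5
  simp only [pv]
  norm_num [List.range_succ, group_cost, g0, g1, g2, g3, g4, g5, pv5]
  ring_nf
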